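-- pv_equiv track=rewrite | github.com/Donny-GUI/combinepy | combined.py | gap_after_imports
-- ===== SOURCE A (Python) =====
-- def gap_after_imports(source: str):
--     lines = source.split('\n')
--     new_lines = []
--     last = ''
--     for line in lines:
--         if last.startswith('import ') and (not line.startswith('import ')):
--             new_lines.append('')
--         new_lines.append(line)
--         last = line
--     return '\n'.join(new_lines)
-- ===== SOURCE B (Python) =====
-- def gap_after_imports(source: str):
--     # Single index-based scan over the raw string: at each line start, if the line
--     # ends an import block (is import-prefixed while the next line is not), emit it with an extra newline; no split into a line list, no
--     # previous-line state.
--     out = []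
--     i = 0
--     n = len(source)
--     while i < n:
--         j = source.find('\n', i)
--         if j == -1:
--             out.append(source[i:])
--             break
--         line_end = j + 1
--         if source.startswith('import ', i) and not source.startswith('import ', line_end):
--             out.append(source[i:line_end] + '\n')
--         else:
--             out.append(source[i:line_end])
--         i = line_end
--     return ''.join(out)
-- ===== Notes on version B (the rewrite author's own statement) =====
-- stated objective: alternative
-- what changed: Replaces the split-into-lines loop with a previous-line state variable and a final join by a single anchored scan over the raw string that appends an extra newline after each import-prefixed line whose following line is not import-prefixed.
import Mathlib
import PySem

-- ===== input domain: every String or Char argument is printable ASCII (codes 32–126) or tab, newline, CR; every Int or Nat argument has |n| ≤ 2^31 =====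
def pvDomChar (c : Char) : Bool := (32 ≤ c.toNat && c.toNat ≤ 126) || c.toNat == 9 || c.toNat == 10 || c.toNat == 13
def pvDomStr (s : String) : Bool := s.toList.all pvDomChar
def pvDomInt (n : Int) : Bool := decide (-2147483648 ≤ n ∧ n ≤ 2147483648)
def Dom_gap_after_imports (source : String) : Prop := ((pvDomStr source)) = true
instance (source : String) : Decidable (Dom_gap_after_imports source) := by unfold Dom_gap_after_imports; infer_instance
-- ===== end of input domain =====

-- B replaces A's split-into-lines loop (previous-line state + join) by one anchored
-- scan over the raw character stream; alternative structure, same cost.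


-- ===== PORT A =====
-- the for-loop over lines with its `last` state, emitting '' before a non-import
-- line that follows an import line (new_lines built front to back)
def gapALoop (lines : List (List Char)) (last : List Char) : List (List Char) :=
  match lines with
  | [] => []
  | line :: rest =>
    if PySem.Chars.startswith last "import ".toList
        && !(PySem.Chars.startswith line "import ".toList)
    then [] :: line :: gapALoop rest line
    else line :: gapALoop rest line

def gap_after_imports (source : String) : String :=
  -- lines = source.split('\n'); the loop; '\n'.join(new_lines)
  String.mk (PySem.Chars.join "\n".toList
    (gapALoop (PySem.Chars.splitOn source.toList "\n".toList) "".toList))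

-- ===== PORT B =====
-- Source B's while-loop over the index i, transcribed with the suffix source[i:] as the
-- recursion argument: `source.find('\n', i)` = the takeWhile/dropWhile split of the
-- suffix at its first '\n' (j == -1 ↔ dropWhile = []), `source.startswith('import ', i)`
-- = isPrefixOf on the suffix, `source.startswith('import ', line_end)` = isPrefixOf on r,
-- and out.append/''.join = the emitted pieces concatenated with ++.
def gapBScan (cs : List Char) : List Char :=
  match h : cs.dropWhile (· ≠ '\n') with
  | [] => cs.takeWhile (· ≠ '\n')          -- j == -1: append source[i:] and break
  | _ :: r =>
    if "import ".toList.isPrefixOf cs && !("import ".toList.isPrefixOf r)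
    then (cs.takeWhile (· ≠ '\n') ++ ['\n', '\n']) ++ gapBScan r   -- source[i:line_end] + '\n'
    else (cs.takeWhile (· ≠ '\n') ++ ['\n']) ++ gapBScan r         -- source[i:line_end]
termination_by cs.length
decreasing_by
  all_goals
    have hs : cs.dropWhile (· ≠ '\n') <:+ cs := List.dropWhile_suffix _
    rw [h] at hs
    have := hs.length_le
    simp at this ⊢
    omega

def gap_after_imports_alt (source : String) : String :=
  String.mk (gapBScan source.toList)

-- ===== PRECONDITION & SPEC =====
def Spec_gap_after_imports (source : String) (out : String) : Prop := out = gap_after_imports_alt source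
instance (source : String) (out : String) : Decidable (Spec_gap_after_imports source out) := by unfold Spec_gap_after_imports; infer_instance

-- ===== CLAIM (what is proved, stated in full; the proofs are below) =====
def Claim_equal_gap_after_imports : Prop := ∀ (source : String), Dom_gap_after_imports source → Spec_gap_after_imports source (gap_after_imports source)

-- ===== LEMMAS AND PROOFS =====

-- simple structural line splitter used only by the proofs
def nlSplit : List Char → List (List Char)
  | [] => [[]]
  | c :: r =>
    if c = '\n' then [] :: nlSplit r
    else
      match nlSplit r with
      | [] => [[c]]
      | p :: ps => (c :: p) :: ps

theorem nlSplit_ne_nil (cs : List Char) : nlSplit cs ≠ [] := by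
  cases cs with
  | nil => simp [nlSplit]
  | cons c r =>
    simp only [nlSplit]
    split
    · simp
    · cases h : nlSplit r <;> simp

theorem splitOn_go_eq :
    ∀ fuel (l cur : List Char) (acc : List (List Char)), l.length < fuel →
      PySem.Chars.splitOn.go ['\n'] fuel l cur acc =
        acc.reverse ++ (match nlSplit l with
          | [] => []
          | p :: ps => (cur.reverse ++ p) :: ps) := by
  intro fuel
  induction fuel with
  | zero => intro l cur acc h; omega
  | succ fuel ih =>
    intro l cur acc h
    cases l with
    | nil => simp [PySem.Chars.splitOn.go, nlSplit]
    | cons c rest =>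
      simp only [PySem.Chars.splitOn.go]
      by_cases hc : c = '\n'
      · subst hc
        have hpre : List.isPrefixOf ['\n'] ('\n' :: rest) = true := by
          show ('\n' == '\n' && List.isPrefixOf [] rest) = true
          simp [List.isPrefixOf]
        rw [if_pos hpre]
        have hih := ih rest [] (cur.reverse :: acc) (by simp at h ⊢; omega)
        simp only [List.length_singleton, List.drop_succ_cons, List.drop_zero]
        rw [hih]
        cases hr : nlSplit rest with
        | nil => exact absurd hr (nlSplit_ne_nil rest)
        | cons p ps => simp [nlSplit, hr]
      · have hpre : List.isPrefixOf ['\n'] (c :: rest) = false := by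
          show ('\n' == c && List.isPrefixOf [] rest) = false
          simp [Ne.symm hc]
        rw [if_neg (by simp [hpre])]
        rw [ih rest (c :: cur) acc (by simp at h ⊢; omega)]
        cases hr : nlSplit rest with
        | nil => exact absurd hr (nlSplit_ne_nil rest)
        | cons p ps => simp [nlSplit, hc, hr]

theorem splitOn_eq_nlSplit (cs : List Char) :
    PySem.Chars.splitOn cs "\n".toList = nlSplit cs := by
  have h : "\n".toList = ['\n'] := by decide
  rw [h]
  show PySem.Chars.splitOn.go ['\n'] (cs.length + 1) cs [] [] = _
  rw [splitOn_go_eq (cs.length + 1) cs [] [] (by omega)]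
  cases hr : nlSplit cs with
  | nil => exact absurd hr (nlSplit_ne_nil cs)
  | cons p ps => simp

theorem nlSplit_no_nl (cs : List Char) (h : '\n' ∉ cs) : nlSplit cs = [cs] := by
  induction cs with
  | nil => rfl
  | cons c r ih =>
    simp at h
    simp only [nlSplit]
    rw [if_neg (fun hh => h.1 hh.symm), ih h.2]

theorem nlSplit_append (l r : List Char) (h : '\n' ∉ l) :
    nlSplit (l ++ '\n' :: r) = l :: nlSplit r := by
  induction l with
  | nil => simp [nlSplit]
  | cons c l' ih =>
    simp at h
    simp only [List.cons_append, nlSplit]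
    rw [if_neg (fun hh => h.1 hh.symm), ih h.2]

-- "import " contains no '\n', so its being a prefix of `l ++ '\n'::r` only looks at l
theorem prefix_line (p l r : List Char) (hp : '\n' ∉ p) (hl : '\n' ∉ l) :
    p.isPrefixOf (l ++ '\n' :: r) = p.isPrefixOf l := by
  induction p generalizing l with
  | nil => simp [List.isPrefixOf]
  | cons c p' ih =>
    simp at hp
    cases l with
    | nil =>
      have hcb : (c == '\n') = false := beq_eq_false_iff_ne.mpr (fun hh => hp.1 hh.symm)
      simp [List.isPrefixOf_cons₂, hcb, List.isPrefixOf]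
    | cons d l' =>
      simp at hl
      simp only [List.cons_append, List.isPrefixOf_cons₂]
      by_cases hcd : d = c
      · subst hcd; simp [ih l' hp.2 hl.2]
      · have hcb : (c == d) = false := beq_eq_false_iff_ne.mpr (fun hh => hcd hh.symm)
        rw [hcb]
        simp

theorem gapALoop_cons (l : List Char) (rest : List (List Char)) (last : List Char) :
    gapALoop (l :: rest) last =
      if PySem.Chars.startswith last "import ".toList
          && !(PySem.Chars.startswith l "import ".toList)
      then [] :: l :: gapALoop rest l
      else l :: gapALoop rest l := rfl

theorem gapALoop_ne_nil (lines : List (List Char)) (last : List Char) (h : lines ≠ []) :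
    gapALoop lines last ≠ [] := by
  cases lines with
  | nil => exact absurd rfl h
  | cons l rest => rw [gapALoop_cons]; split <;> simp

theorem no_nl_takeWhile (cs : List Char) : '\n' ∉ cs.takeWhile (· ≠ '\n') := by
  intro hmem
  have := List.mem_takeWhile_imp hmem
  simp at this

theorem gapBScan_nil (cs : List Char) (h : cs.dropWhile (· ≠ '\n') = []) :
    gapBScan cs = cs.takeWhile (· ≠ '\n') := by
  rw [gapBScan.eq_def]
  split
  · rfl
  · rename_i d' r' heq
    rw [h] at heq
    cases heq

theorem gapBScan_cons (cs : List Char) (d : Char) (r : List Char)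
    (h : cs.dropWhile (· ≠ '\n') = d :: r) :
    gapBScan cs =
      if "import ".toList.isPrefixOf cs && !("import ".toList.isPrefixOf r)
      then (cs.takeWhile (· ≠ '\n') ++ ['\n', '\n']) ++ gapBScan r
      else (cs.takeWhile (· ≠ '\n') ++ ['\n']) ++ gapBScan r := by
  rw [gapBScan.eq_def]
  split
  · rename_i heq
    rw [h] at heq; cases heq
  · rename_i d' r' heq
    rw [h] at heq
    cases heq
    rfl

theorem nl_lit : "\n".toList = ['\n'] := rfl

theorem main_aux (n : Nat) : ∀ (cs last : List Char), cs.length ≤ n →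
    PySem.Chars.join "\n".toList (gapALoop (nlSplit cs) last) =
      (if PySem.Chars.startswith last "import ".toList
          && !("import ".toList.isPrefixOf cs) then ['\n'] else []) ++ gapBScan cs := by
  induction n with
  | zero =>
    intro cs last hlen
    have hcs : cs = [] := by
      cases cs with
      | nil => rfl
      | cons c r => simp at hlen
    subst hcs
    simp only [nlSplit, gapALoop, PySem.Chars.startswith, gapBScan_nil ([] : List Char) rfl]
    split_ifs with hP <;>
      simp [nl_lit, PySem.Chars.join_cons_cons, PySem.Chars.join_singleton]
  | succ n ihn =>
    intro cs last hlen
    cases h : cs.dropWhile (· ≠ '\n') with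
    | nil =>
      have hcs : cs = cs.takeWhile (· ≠ '\n') := by
        conv_lhs => rw [← List.takeWhile_append_dropWhile (p := (· ≠ '\n')) (l := cs)]
        rw [h]; simp
      rw [nlSplit_no_nl cs (fun hm => no_nl_takeWhile cs (hcs ▸ hm)), gapBScan_nil cs h,
        gapALoop_cons]
      simp only [PySem.Chars.startswith, gapALoop]
      rw [← hcs]
      split_ifs with hP <;>
        simp [nl_lit, PySem.Chars.join_cons_cons, PySem.Chars.join_singleton]
    | cons d r =>
      have hd : d = '\n' := by
        have h2 : (cs.dropWhile (· ≠ '\n')).head? = some d := by rw [h]; rfl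
        have h3 := List.head?_dropWhile_not (p := (· ≠ '\n')) (l := cs)
        rw [h2] at h3
        simpa using h3
      subst hd
      have hcs : cs = cs.takeWhile (· ≠ '\n') ++ '\n' :: r := by
        conv_lhs => rw [← List.takeWhile_append_dropWhile (p := (· ≠ '\n')) (l := cs)]
        rw [h]
      have hnl : '\n' ∉ cs.takeWhile (· ≠ '\n') := no_nl_takeWhile cs
      have hlen' : r.length ≤ n := by
        have := congrArg List.length hcs
        simp at this
        omega
      rw [gapBScan_cons cs '\n' r h]
      obtain ⟨y, ys, hE⟩ : ∃ y ys, gapALoop (nlSplit r) (cs.takeWhile (· ≠ '\n')) = y :: ys := by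
        cases hE : gapALoop (nlSplit r) (cs.takeWhile (· ≠ '\n')) with
        | nil => exact absurd hE (gapALoop_ne_nil _ _ (nlSplit_ne_nil r))
        | cons y ys => exact ⟨y, ys, rfl⟩
      have hIH := ihn r (cs.takeWhile (· ≠ '\n')) hlen'
      rw [hE] at hIH
      conv_lhs => rw [hcs, nlSplit_append _ r hnl]
      rw [gapALoop_cons, hE]
      rw [show ("import ".toList.isPrefixOf cs) =
            ("import ".toList.isPrefixOf (cs.takeWhile (· ≠ '\n'))) by
          conv_lhs => rw [hcs]
          exact prefix_line _ _ r (by decide) hnl]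
      simp only [PySem.Chars.startswith, nl_lit] at hIH ⊢
      split_ifs with hC1 hC2 hC2 <;>
        first
        | (rw [if_pos hC2] at hIH
           simp [hIH, PySem.Chars.join_cons_cons, PySem.Chars.join_singleton])
        | (rw [if_neg hC2] at hIH
           simp [hIH, PySem.Chars.join_cons_cons])

-- ===== VERDICT (by name: the statement is the Claim_ definition above) =====
theorem gap_after_imports_spec : Claim_equal_gap_after_imports := by
  intro source _
  unfold Spec_gap_after_imports gap_after_imports gap_after_imports_alt
  rw [splitOn_eq_nlSplit]
  rw [main_aux source.toList.length source.toList "".toList (le_refl _)]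
  simp [PySem.Chars.startswith]
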